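-- pv_equiv track=rewrite | github.com/crochereau/Word-based-LM | src/utils.py | gender_tokenizer
-- ===== SOURCE A (Python) =====
-- def gender_tokenizer(intervening_elements, sentences, word_to_idx):
--     """
--     Args:
--         intervening_elements: number of elements between article and noun
--         sentences: text file
--         word_to_idx: vocabulary mapping word to unique integers
--
--     Returns:
--         encoded_sentences: list of lists of encoded sentences, size = number of sentences
--     """
--     tokens = sentences.split()
--     tokenized_sentences = [tokens[x:x + intervening_elements] for x in range(0, len(tokens), intervening_elements)]
--
--     # Encode words into integers using vocabulary
--     encoded_sentences = [[] for _ in range(len(tokenized_sentences))]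
--     for i in range(len(tokenized_sentences)):
--         for j in range(len(tokenized_sentences[i])):
--             word = tokenized_sentences[i][j]
--             # 0: used for padding; 1: unused; 2: for OOV words
--             encoded_sentences[i].append(word_to_idx[word] if word in word_to_idx else 2)
--
--     # Add dot at beginning and end of stimuli
--     for i in range(len(encoded_sentences)):
--         encoded_sentences[i].insert(0, 3)
--         encoded_sentences[i].append(3)
--
--     return encoded_sentences
-- ===== SOURCE B (Python) =====
-- def gender_tokenizer(intervening_elements, sentences, word_to_idx):
--     # Single streaming pass: walk the token stream once with a current-chunk
--     # accumulator that already starts with the sentinel 3; when the chunk is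
--     # full it is sealed with a trailing 3 and emitted, and a trailing partial
--     # chunk is sealed after the loop. No index ranges, no slicing, no staged
--     # chunk/encode/sentinel passes.
--     out = []
--     cur = [3]
--     for w in sentences.split():
--         cur.append(word_to_idx[w] if w in word_to_idx else 2)
--         if len(cur) == intervening_elements + 1:
--             cur.append(3)
--             out.append(cur)
--             cur = [3]
--     if len(cur) > 1:
--         cur.append(3)
--         out.append(cur)
--     return out
-- ===== Notes on version B (the rewrite author's own statement) =====
-- stated objective: alternative
-- what changed: B replaces A's three staged passes (index-range chunking, nested index encoding, sentinel insert/append) by one streaming fold over the token stream that carries the current partial chunk, seals a chunk with the sentinel the moment it fills, and seals the trailing partial chunk after the loop.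
-- outside the precondition, e.g. on gender_tokenizer(-1, 'a b', {}): A returns [], B returns [[3, 2, 2, 3]]; on gender_tokenizer(0, 'a', {}): A raises ValueError, B returns [[3, 2, 3]]
import Mathlib
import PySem

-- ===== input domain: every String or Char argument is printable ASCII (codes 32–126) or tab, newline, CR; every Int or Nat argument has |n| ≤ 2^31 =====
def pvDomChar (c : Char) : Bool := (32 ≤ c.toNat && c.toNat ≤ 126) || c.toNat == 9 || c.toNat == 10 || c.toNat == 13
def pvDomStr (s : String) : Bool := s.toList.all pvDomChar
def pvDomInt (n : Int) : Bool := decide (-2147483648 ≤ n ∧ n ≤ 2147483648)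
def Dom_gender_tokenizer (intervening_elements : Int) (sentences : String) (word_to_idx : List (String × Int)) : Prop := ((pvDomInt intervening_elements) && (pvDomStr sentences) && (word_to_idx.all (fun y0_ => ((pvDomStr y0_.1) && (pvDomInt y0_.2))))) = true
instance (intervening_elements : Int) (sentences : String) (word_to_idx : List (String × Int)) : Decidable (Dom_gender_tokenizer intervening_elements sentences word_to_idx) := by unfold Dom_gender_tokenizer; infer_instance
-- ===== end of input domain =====

-- B replaces A's three staged passes (chunk by index ranges, nested encode, sentinel insert/append)
-- by ONE streaming pass over the token stream with a current-chunk accumulator (objective: alternative).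

-- ===== PORT A =====
-- A: chunk the token list by index ranges, then encode each chunk word by word
-- with append, then insert/append the sentinel 3 on each encoded chunk.
def gender_tokenizer (intervening_elements : Int) (sentences : String) (word_to_idx : List (String × Int)) : List (List Int) :=
  let tokens := PySem.Str.split₀ sentences
  let tokenized_sentences :=
    (PySem.List.pyRange 0 (tokens.length : Int) intervening_elements).map
      (fun x => PySem.List.slice tokens (some x) (some (x + intervening_elements)))
  let encoded_sentences :=
    tokenized_sentences.map (fun sent =>
      sent.foldl (fun acc word =>
        acc ++ [if (PySem.Dict.mk word_to_idx).contains word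
                then (PySem.Dict.mk word_to_idx).getD word 2 else 2]) [])
  encoded_sentences.map (fun l => ([3] ++ l) ++ [3])

-- ===== PORT B =====
-- B: one fold over the tokens carrying (emitted chunks, current chunk already opened with 3);
-- a full chunk is sealed and emitted inside the fold, a trailing partial chunk after it.
def gender_tokenizer_alt (intervening_elements : Int) (sentences : String) (word_to_idx : List (String × Int)) : List (List Int) :=
  let st :=
    (PySem.Str.split₀ sentences).foldl
      (fun (st : List (List Int) × List Int) w =>
        let cur := st.2 ++ [if (PySem.Dict.mk word_to_idx).contains w
                            then (PySem.Dict.mk word_to_idx).getD w 2 else 2]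
        if (cur.length : Int) = intervening_elements + 1
        then (st.1 ++ [cur ++ [3]], ([3] : List Int))
        else (st.1, cur))
      ([], [3])
  if st.2.length > 1 then st.1 ++ [st.2 ++ [3]] else st.1

-- ===== PRECONDITION & SPEC =====
-- Pre_ excludes non-positive chunk sizes: intervening_elements = 0 makes A raise ValueError in
-- range(); for intervening_elements < 0 A's empty output is an accident of range() semantics on a
-- meaningless chunk size (B's streaming pass returns the whole stream as one chunk there).
def Pre_gender_tokenizer (intervening_elements : Int) (sentences : String) (word_to_idx : List (String × Int)) : Prop :=
  1 ≤ intervening_elements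
instance (intervening_elements : Int) (sentences : String) (word_to_idx : List (String × Int)) : Decidable (Pre_gender_tokenizer intervening_elements sentences word_to_idx) := by unfold Pre_gender_tokenizer; infer_instance

def pvWitness_gender_tokenizer : Int × String × (List (String × Int)) := (2, "le chat dort bien", [("le", 5), ("chat", 9)])

def Spec_gender_tokenizer (intervening_elements : Int) (sentences : String) (word_to_idx : List (String × Int)) (out : List (List Int)) : Prop := out = gender_tokenizer_alt intervening_elements sentences word_to_idx
instance (intervening_elements : Int) (sentences : String) (word_to_idx : List (String × Int)) (out : List (List Int)) : Decidable (Spec_gender_tokenizer intervening_elements sentences word_to_idx out) := by unfold Spec_gender_tokenizer; infer_instance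

-- ===== CLAIM (what is proved, stated in full; the proofs are below) =====
def Claim_equal_gender_tokenizer : Prop := ∀ (intervening_elements : Int) (sentences : String) (word_to_idx : List (String × Int)), Dom_gender_tokenizer intervening_elements sentences word_to_idx → Pre_gender_tokenizer intervening_elements sentences word_to_idx → Spec_gender_tokenizer intervening_elements sentences word_to_idx (gender_tokenizer intervening_elements sentences word_to_idx)

-- ===== LEMMAS AND PROOFS =====

-- common reference point of both proofs: the encoded, sentinel-wrapped chunks of a token list
def pvChunksEnc (f : String → Int) (m : Nat) : List String → List (List Int)
  | [] => []
  | t :: ts => (3 :: f t :: (ts.take m).map f ++ [3]) :: pvChunksEnc f m (ts.drop m)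
termination_by toks => toks.length
decreasing_by simp

theorem pvChunksEnc_nil (f : String → Int) (m : Nat) : pvChunksEnc f m [] = [] := by
  rw [pvChunksEnc]

theorem pvChunksEnc_cons (f : String → Int) (m : Nat) (t : String) (ts : List String) :
    pvChunksEnc f m (t :: ts) = (3 :: f t :: (ts.take m).map f ++ [3]) :: pvChunksEnc f m (ts.drop m) := by
  rw [pvChunksEnc]

theorem pvA_range (f : String → Int) (m : Nat) (toks : List String) :
    (List.range ((toks.length + m) / (m + 1))).map
      (fun i => 3 :: ((toks.drop (i * (m + 1))).take (m + 1)).map f ++ [3])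
      = pvChunksEnc f m toks := by
  match toks with
  | [] => simp [pvChunksEnc_nil, Nat.div_eq_of_lt]
  | t :: ts =>
    have hcnt : ((t :: ts).length + m) / (m + 1) = ((ts.drop m).length + m) / (m + 1) + 1 := by
      simp only [List.length_cons, List.length_drop]
      by_cases h : m ≤ ts.length
      · rw [Nat.sub_add_cancel h]
        have h2 : ts.length + 1 + m = ts.length + (m + 1) := by omega
        rw [h2, Nat.add_div_right _ (by omega)]
      · have h0 : ts.length - m = 0 := by omega
        have h1 : (ts.length + 1 + m) / (m + 1) = 1 :=
          Nat.div_eq_of_lt_le (by omega) (by omega)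
        have h2 : (0 + m) / (m + 1) = 0 := Nat.div_eq_of_lt (by omega)
        rw [h0, h1, h2]
    rw [hcnt, List.range_succ_eq_map, List.map_cons, List.map_map, pvChunksEnc_cons]
    congr 1
    · simp [List.take_succ_cons]
    · rw [← pvA_range f m (ts.drop m)]
      refine List.map_congr_left (fun i _ => ?_)
      have htail : (t :: ts).drop ((i + 1) * (m + 1)) = (ts.drop m).drop (i * (m + 1)) := by
        rw [List.drop_drop]
        have h1 : (i + 1) * (m + 1) = (m + i * (m + 1)) + 1 := by ring
        rw [h1, List.drop_succ_cons]
      simp [Function.comp, htail]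
termination_by toks.length
decreasing_by simp

theorem pv_contains_getD (d : PySem.Dict String Int) (w : String) :
    (if d.contains w then d.getD w 2 else 2) = d.getD w 2 := by
  by_cases h : d.contains w
  · simp [h]
  · have hn : d.get? w = none :=
      (PySem.Dict.get?_eq_none_iff_contains d w).mpr (by simpa using h)
    simp [h, PySem.Dict.getD, hn]

-- ===== B side: the streaming fold equals pvChunksEnc =====
def pvStep (f : String → Int) (k : Int) (st : List (List Int) × List Int) (w : String) : List (List Int) × List Int :=
  let cur := st.2 ++ [f w]
  if (cur.length : Int) = k + 1 then (st.1 ++ [cur ++ [3]], ([3] : List Int)) else (st.1, cur)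

def pvFinish (st : List (List Int) × List Int) : List (List Int) :=
  if st.2.length > 1 then st.1 ++ [st.2 ++ [3]] else st.1

-- consuming one chunk's worth of tokens (r = remaining capacity of cur)
theorem pvB_chunk (f : String → Int) (m : Nat) (toks : List String) :
    ∀ (r : Nat) (out : List (List Int)) (cur : List Int), 1 ≤ r → cur.length + r = m + 2 →
    toks.foldl (pvStep f ((m + 1 : Nat) : Int)) (out, cur) =
      if toks.length < r then (out, cur ++ toks.map f)
      else (toks.drop r).foldl (pvStep f ((m + 1 : Nat) : Int)) (out ++ [cur ++ (toks.take r).map f ++ [3]], [3]) := by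
  induction toks with
  | nil => intro r out cur hr _; rw [if_pos (by simpa using hr)]; simp
  | cons t ts ih =>
    intro r out cur hr hlen
    rw [List.foldl_cons]
    rcases Nat.eq_or_lt_of_le hr with h1 | h1
    · -- r = 1 : the current chunk fills now and is emitted
      have hcond : ((cur ++ [f t]).length : Int) = ((m + 1 : Nat) : Int) + 1 := by
        simp; omega
      simp only [pvStep, hcond, ← h1]
      simp
    · -- r ≥ 2 : the chunk is still open
      have hcond : ¬ (((cur ++ [f t]).length : Int) = ((m + 1 : Nat) : Int) + 1) := by
        simp; omega
      simp only [pvStep, if_neg hcond]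
      rw [ih (r - 1) out (cur ++ [f t]) (by omega) (by simp; omega)]
      by_cases hlt : ts.length < r - 1
      · rw [if_pos hlt, if_pos (by simp; omega)]
        simp
      · rw [if_neg hlt, if_neg (by simp; omega)]
        have hr' : r = (r - 1) + 1 := by omega
        rw [hr', List.drop_succ_cons, List.take_succ_cons]
        simp
theorem pvB_stream (f : String → Int) (m : Nat) (toks : List String) (out : List (List Int)) :
    pvFinish (toks.foldl (pvStep f ((m + 1 : Nat) : Int)) (out, [3])) = out ++ pvChunksEnc f m toks := by
  match toks with
  | [] => simp [pvFinish, pvChunksEnc_nil]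
  | t :: ts =>
    rw [pvB_chunk f m (t :: ts) (m + 1) out [3] (by omega) (by simp; omega)]
    by_cases h : (t :: ts).length < m + 1
    · rw [if_pos h]
      have h1 : ts.take m = ts := List.take_of_length_le (by simp at h; omega)
      have h2 : ts.drop m = [] := List.drop_eq_nil_of_le (by simp at h; omega)
      simp [pvFinish, pvChunksEnc_cons, pvChunksEnc_nil, h1, h2]
    · rw [if_neg h]
      rw [pvB_stream f m ((t :: ts).drop (m + 1)) _]
      rw [List.drop_succ_cons, pvChunksEnc_cons]
      simp
termination_by toks.length
decreasing_by simp

-- ===== VERDICT (by name: the statement is the Claim_ definition above) =====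
theorem gender_tokenizer_spec : Claim_equal_gender_tokenizer := by
  intro ie s d _ hpre
  unfold Spec_gender_tokenizer
  obtain ⟨m, rfl⟩ : ∃ m : Nat, ie = ((m + 1 : Nat) : Int) :=
    ⟨(ie - 1).toNat, by unfold Pre_gender_tokenizer at hpre; omega⟩
  set toks := PySem.Str.split₀ s with htoks
  set f : String → Int := fun w => (PySem.Dict.mk d).getD w 2 with hf
  -- A side
  have hA : gender_tokenizer ((m + 1 : Nat) : Int) s d = pvChunksEnc f m toks := by
    rw [← pvA_range f m toks]
    simp only [gender_tokenizer]
    rw [PySem.List.pyRange_of_pos 0 (toks.length : Int) (by exact_mod_cast Nat.succ_pos m)]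
    simp only [List.map_map]
    by_cases h0 : toks = []
    · simp [h0]
    · have hlen : 0 < toks.length := List.length_pos_iff.mpr h0
      rw [if_pos (by exact_mod_cast hlen)]
      have hcnt : (((toks.length : Int) - 0 + ((m + 1 : Nat) : Int) - 1) / ((m + 1 : Nat) : Int)).toNat
          = (toks.length + m) / (m + 1) := by
        have : ((toks.length : Int) - 0 + ((m + 1 : Nat) : Int) - 1) = ((toks.length + m : Nat) : Int) := by
          push_cast; ring
        rw [this, ← Int.natCast_ediv, Int.toNat_natCast]
      rw [hcnt]
      refine List.map_congr_left (fun i _ => ?_)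
      simp only [Function.comp]
      have hidx : (0 : Int) + ((m + 1 : Nat) : Int) * (i : Int) = ((i * (m + 1) : Nat) : Int) := by
        push_cast; ring
      rw [hidx]
      have hslice : PySem.List.slice toks (some ((i * (m + 1) : Nat) : Int))
            (some (((i * (m + 1) : Nat) : Int) + ((m + 1 : Nat) : Int)))
          = (toks.drop (i * (m + 1))).take (m + 1) := PySem.List.slice_natCast_add toks _ _
      rw [hslice, PySem.List.foldl_append_singleton_eq_map]
      simp only [pv_contains_getD]
      simp [hf]
  -- B side
  have hB : gender_tokenizer_alt ((m + 1 : Nat) : Int) s d = pvChunksEnc f m toks := by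
    unfold gender_tokenizer_alt
    have hstep : (fun (st : List (List Int) × List Int) w =>
        let cur := st.2 ++ [if (PySem.Dict.mk d).contains w
                            then (PySem.Dict.mk d).getD w 2 else 2]
        if (cur.length : Int) = ((m + 1 : Nat) : Int) + 1
        then (st.1 ++ [cur ++ [3]], ([3] : List Int))
        else (st.1, cur)) = pvStep f ((m + 1 : Nat) : Int) := by
      funext st w
      simp only [pvStep, pv_contains_getD, hf]
    rw [hstep]
    have := pvB_stream f m toks []
    simpa [pvFinish] using this
  rw [hA, hB]
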